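-- pv_equiv track=rewrite | github.com/ChrisCurrin/opinion_dynamics | opdynamics/utils/latex_helpers.py | math_fix
-- ===== SOURCE A (Python) =====
-- def math_clean(_s: str):
--     """Remove all '$' symbols in a string"""
--     return _s.replace("$", "")
--
-- def math_fix(_s: str):
--     """Keep only first and last '$' in a math expression"""
--     num_dollar = 0
--     first = 0
--     last = 0
--     for idx, c in enumerate(_s):
--         if c == "$":
--             num_dollar += 1
--             if num_dollar == 1:
--                 first = idx
--             last = idx
--     if num_dollar > 2:
--         return f"{_s[:first + 1]}{math_clean(_s[first + 1:last])}{_s[last:]}"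
--     elif num_dollar % 2 == 1:
--         return f"${math_clean(_s)}$"
--     else:
--         return _s
-- ===== SOURCE B (Python) =====
-- def math_fix(_s: str):
--     """Keep only first and last '$' in a math expression"""
--     parts = _s.split("$")
--     n = len(parts) - 1
--     if n >= 2:
--         return parts[0] + "$" + "".join(parts[1:-1]) + "$" + parts[-1]
--     elif n == 1:
--         return "$" + "".join(parts) + "$"
--     else:
--         return _s
-- ===== Notes on version B (the rewrite author's own statement) =====
-- stated objective: simpler
-- what changed: Replaces A's index-tracking enumerate loop plus slice/replace reconstruction by splitting the string on the dollar separator into segments and re-concatenating first segment + separator + joined interior + separator + last segment.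
import Mathlib
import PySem

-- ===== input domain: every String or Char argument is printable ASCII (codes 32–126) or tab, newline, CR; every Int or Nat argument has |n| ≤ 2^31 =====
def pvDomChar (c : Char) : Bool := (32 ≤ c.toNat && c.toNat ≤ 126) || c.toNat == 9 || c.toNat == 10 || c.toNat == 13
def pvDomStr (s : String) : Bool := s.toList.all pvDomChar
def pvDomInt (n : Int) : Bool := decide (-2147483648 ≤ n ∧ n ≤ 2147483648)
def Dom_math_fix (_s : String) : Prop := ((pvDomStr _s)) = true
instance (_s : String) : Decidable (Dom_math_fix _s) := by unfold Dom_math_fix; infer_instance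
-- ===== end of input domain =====

-- B replaces A's index-tracking loop + slice/replace reconstruction by split('$') into segments
-- and re-concatenation (objective: simpler).

-- ===== PORT A =====
-- helper math_clean: _s.replace("$", "")
def mathClean (cs : List Char) : List Char := PySem.Chars.replace cs ['$'] []

-- the 'for idx, c in enumerate(_s)' loop, state (num_dollar, first, last)
def mfLoopA : Nat → Int × Int × Int → List Char → Int × Int × Int
  | _, st, [] => st
  | i, (nd, fi, la), c :: cs =>
      mfLoopA (i + 1) (if c = '$' then (nd + 1, if nd + 1 = 1 then (i : Int) else fi, (i : Int)) else (nd, fi, la)) cs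

def math_fix (_s : String) : String :=
  let cs := _s.toList
  let st := mfLoopA 0 (0, 0, 0) cs
  let nd := st.1
  let fi := st.2.1
  let la := st.2.2
  if nd > 2 then
    String.ofList (PySem.Chars.slice cs none (some (fi + 1)) ++
      mathClean (PySem.Chars.slice cs (some (fi + 1)) (some la)) ++
      PySem.Chars.slice cs (some la) none)
  else if PySem.Int.mod nd 2 = 1 then
    String.ofList ('$' :: mathClean cs ++ ['$'])
  else _s

-- ===== PORT B =====
def math_fix_alt (_s : String) : String :=
  let parts := PySem.Chars.splitOn _s.toList ['$']
  let n : Int := (parts.length : Int) - 1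
  if n ≥ 2 then
    -- parts[0] / parts[-1]: split never returns an empty list, so headD/getLastD are exact
    String.ofList (parts.headD [] ++ '$' ::
      PySem.Chars.join [] (PySem.List.slice parts (some 1) (some (-1))) ++
      '$' :: parts.getLastD [])
  else if n = 1 then
    String.ofList ('$' :: PySem.Chars.join [] parts ++ ['$'])
  else _s

-- ===== PRECONDITION & SPEC =====
def Spec_math_fix (_s : String) (out : String) : Prop := out = math_fix_alt _s
instance (_s : String) (out : String) : Decidable (Spec_math_fix _s out) := by unfold Spec_math_fix; infer_instance

-- ===== CLAIM (what is proved, stated in full; the proofs are below) =====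
def Claim_equal_math_fix : Prop := ∀ (_s : String), Dom_math_fix _s → Spec_math_fix _s (math_fix _s)

-- ===== LEMMAS AND PROOFS =====

-- recursive specification of Python's split('$'): pre is the chunk being accumulated
def splitSpec : List Char → List Char → List (List Char)
  | pre, [] => [pre]
  | pre, c :: t => if c = '$' then pre :: splitSpec [] t else splitSpec (pre ++ [c]) t

theorem splitOn_go_eq (fuel : Nat) (l cur : List Char) (acc : List (List Char)) (h : l.length ≤ fuel) :
    PySem.Chars.splitOn.go ['$'] fuel l cur acc = acc.reverse ++ splitSpec cur.reverse l := by
  induction fuel generalizing l cur acc with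
  | zero =>
    have : l = [] := by cases l <;> simp_all
    subst this
    simp [PySem.Chars.splitOn.go, splitSpec]
  | succ f ih =>
    cases l with
    | nil => simp [PySem.Chars.splitOn.go, splitSpec]
    | cons c rest =>
      simp only [PySem.Chars.splitOn.go]
      by_cases hc : c = '$'
      · subst hc
        have hp : List.isPrefixOf ['$'] ('$' :: rest) = true := by
          simp [List.isPrefixOf]
        rw [if_pos hp]
        simp only [List.length_cons] at h
        rw [ih _ _ _ (by simpa using Nat.le_of_succ_le_succ h)]
        simp [splitSpec]
      · have hp : List.isPrefixOf ['$'] (c :: rest) = false := by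
          simp [List.isPrefixOf, hc]
          exact fun hh => absurd hh.symm hc
        rw [if_neg (by simp [hp])]
        rw [ih _ _ _ (by simpa using Nat.le_of_succ_le_succ h)]
        simp [splitSpec, hc]

theorem splitOn_eq_splitSpec (cs : List Char) :
    PySem.Chars.splitOn cs ['$'] = splitSpec [] cs := by
  have := splitOn_go_eq (cs.length + 1) cs [] [] (by omega)
  simpa [PySem.Chars.splitOn] using this

theorem replace_go_eq (fuel : Nat) (l acc : List Char) (h : l.length ≤ fuel) :
    PySem.Chars.replace.go ['$'] [] fuel l acc = acc.reverse ++ l.filter (fun c => !(c == '$')) := by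
  induction fuel generalizing l acc with
  | zero =>
    have : l = [] := by cases l <;> simp_all
    subst this
    simp [PySem.Chars.replace.go]
  | succ f ih =>
    cases l with
    | nil => simp [PySem.Chars.replace.go]
    | cons c rest =>
      simp only [PySem.Chars.replace.go]
      by_cases hc : c = '$'
      · subst hc
        have hp : List.isPrefixOf ['$'] ('$' :: rest) = true := by
          simp [List.isPrefixOf]
        rw [if_pos hp]
        simp only [List.length_cons] at h
        rw [ih _ _ (by simpa using Nat.le_of_succ_le_succ h)]
        simp
      · have hp : List.isPrefixOf ['$'] (c :: rest) = false := by
          simp [List.isPrefixOf]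
          exact fun hh => absurd hh.symm hc
        rw [if_neg (by simp [hp])]
        rw [ih _ _ (by simpa using Nat.le_of_succ_le_succ h)]
        simp [hc]

theorem mathClean_eq_filter (cs : List Char) :
    mathClean cs = cs.filter (fun c => !(c == '$')) := by
  simp only [mathClean, PySem.Chars.replace]
  rw [if_neg (by simp)]
  exact replace_go_eq cs.length cs [] le_rfl

theorem filter_of_no_dollar {cs : List Char} (h : '$' ∉ cs) :
    cs.filter (fun c => !(c == '$')) = cs := by
  apply List.filter_eq_self.mpr
  intro a ha
  simp only [Bool.not_eq_eq_eq_not, Bool.not_true, beq_eq_false_iff_ne]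
  exact fun hh => h (hh ▸ ha)

theorem splitSpec_no_dollar {cs : List Char} (pre : List Char) (h : '$' ∉ cs) :
    splitSpec pre cs = [pre ++ cs] := by
  induction cs generalizing pre with
  | nil => simp [splitSpec]
  | cons c t ih =>
    simp only [List.mem_cons, not_or] at h
    rw [splitSpec, if_neg (fun hh => h.1 hh.symm), ih (pre ++ [c]) h.2]
    simp

theorem splitSpec_append (pre x y : List Char) :
    splitSpec pre (x ++ '$' :: y) = splitSpec pre x ++ splitSpec [] y := by
  induction x generalizing pre with
  | nil => simp [splitSpec]
  | cons c t ih =>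
    by_cases hc : c = '$'
    · subst hc; simp [splitSpec, ih]
    · simp [splitSpec, hc, ih]

theorem splitSpec_length (pre cs : List Char) :
    (splitSpec pre cs).length = cs.count '$' + 1 := by
  induction cs generalizing pre with
  | nil => simp [splitSpec]
  | cons c t ih =>
    by_cases hc : c = '$'
    · subst hc; simp [splitSpec, ih, List.count_cons]
    · simp [splitSpec, hc, ih, List.count_cons, Ne.symm hc]

theorem joinNil (ps : List (List Char)) : PySem.Chars.join [] ps = ps.flatten := by
  induction ps with
  | nil => simp [PySem.Chars.join, List.intercalate]
  | cons x t ih =>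
    cases t with
    | nil => simp [PySem.Chars.join, List.intercalate]
    | cons y u =>
      simp only [PySem.Chars.join, List.intercalate, List.intersperse] at ih ⊢
      simp only [List.flatten_cons, ih]
      simp

theorem join_splitSpec (pre cs : List Char) :
    PySem.Chars.join [] (splitSpec pre cs) = pre ++ cs.filter (fun c => !(c == '$')) := by
  rw [joinNil]
  induction cs generalizing pre with
  | nil => simp [splitSpec]
  | cons c t ih =>
    by_cases hc : c = '$'
    · subst hc
      rw [splitSpec, if_pos rfl, List.flatten_cons, ih []]
      simp
    · rw [splitSpec, if_neg hc, ih (pre ++ [c])]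
      simp [hc]

-- A's loop: state passes unchanged over a dollar-free prefix
theorem mfLoopA_no_dollar {a : List Char} (rest : List Char) (i : Nat) (st : Int × Int × Int)
    (h : '$' ∉ a) : mfLoopA i st (a ++ rest) = mfLoopA (i + a.length) st rest := by
  induction a generalizing i st with
  | nil => simp
  | cons c t ih =>
    simp only [List.mem_cons, not_or] at h
    obtain ⟨nd, fi, la⟩ := st
    simp only [List.cons_append, mfLoopA, if_neg (Ne.symm h.1 : ¬ c = '$')]
    rw [ih _ _ h.2]
    congr 1
    simp only [List.length_cons]
    omega

-- a single '$' step of A's loop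
theorem mfLoopA_dollar (i : Nat) (nd fi la : Int) (cs : List Char) :
    mfLoopA i (nd, fi, la) ('$' :: cs) =
      mfLoopA (i + 1) (nd + 1, if nd + 1 = 1 then (i : Int) else fi, (i : Int)) cs := by
  simp [mfLoopA]

theorem mfLoopA_step_ne (i : Nat) (st : Int × Int × Int) {c : Char} (hc : ¬ c = '$')
    (cs : List Char) : mfLoopA i st (c :: cs) = mfLoopA (i + 1) st cs := by
  obtain ⟨nd, fi, la⟩ := st
  simp [mfLoopA, hc]

theorem mfLoopA_nodollar' {a : List Char} (i : Nat) (st : Int × Int × Int) (h : '$' ∉ a) :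
    mfLoopA i st a = st := by
  have := mfLoopA_no_dollar [] i st h
  simpa using this

-- A's loop after the first '$': first stays, last lands on the final '$'
theorem mfLoopA_after {b : List Char} (m : List Char) (i : Nat) (nd fi la : Int)
    (hnd : 1 ≤ nd) (hb : '$' ∉ b) :
    mfLoopA i (nd, fi, la) (m ++ '$' :: b) =
      (nd + (m.count '$' : Int) + 1, fi, ((i + m.length : Nat) : Int)) := by
  induction m generalizing i nd la with
  | nil =>
    rw [List.nil_append, mfLoopA_dollar, if_neg (by omega : ¬ nd + 1 = 1), mfLoopA_nodollar' _ _ hb]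
    simp
  | cons c t ih =>
    by_cases hc : c = '$'
    · subst hc
      rw [List.cons_append, mfLoopA_dollar, if_neg (by omega : ¬ nd + 1 = 1),
        ih (i + 1) (nd + 1) _ (by omega)]
      refine Prod.ext ?_ (Prod.ext ?_ ?_) <;>
        (simp [List.count_cons]; try push_cast; try omega)
    · rw [List.cons_append, mfLoopA_step_ne _ _ hc, ih (i + 1) nd _ hnd]
      have hc' : (c == '$') = false := by simp [hc]
      refine Prod.ext ?_ (Prod.ext ?_ ?_) <;>
        (simp [List.count_cons, hc']; try push_cast; try omega)

theorem exists_first_dollar {cs : List Char} (h : '$' ∈ cs) :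
    ∃ a t, cs = a ++ '$' :: t ∧ '$' ∉ a := by
  induction cs with
  | nil => simp at h
  | cons c rest ih =>
    by_cases hc : c = '$'
    · exact ⟨[], rest, by simp [hc], by simp⟩
    · have : '$' ∈ rest := by
        rcases List.mem_cons.mp h with h1 | h1
        · exact absurd h1.symm hc
        · exact h1
      obtain ⟨a, t, he, ha⟩ := ih this
      exact ⟨c :: a, t, by simp [he], by simp [ha]; exact fun hh => hc hh.symm⟩

theorem exists_last_dollar {cs : List Char} (h : '$' ∈ cs) :
    ∃ m b, cs = m ++ '$' :: b ∧ '$' ∉ b := by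
  induction cs with
  | nil => simp at h
  | cons c rest ih =>
    by_cases hr : '$' ∈ rest
    · obtain ⟨m, b, he, hb⟩ := ih hr
      exact ⟨c :: m, b, by simp [he], hb⟩
    · have hc : c = '$' := by
        rcases List.mem_cons.mp h with h1 | h1
        · exact h1.symm
        · exact absurd h1 hr
      exact ⟨[], rest, by simp [hc], hr⟩

theorem slice_one_neg_one {α : Type} (x z : α) (ys : List α) :
    PySem.List.slice (x :: ys ++ [z]) (some 1) (some (-1)) = ys := by
  simp [PySem.List.slice, PySem.List.clampIdx]
  rw [if_neg (by omega)]
  have h1 : ys.length + 1 - 1 = ys.length := by omega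
  rw [h1]
  exact List.take_left' rfl

theorem math_fix_eq_alt (s : String) : math_fix s = math_fix_alt s := by
  set cs := s.toList with hcs
  by_cases h0 : '$' ∈ cs
  · obtain ⟨a, t, he, ha⟩ := exists_first_dollar h0
    by_cases h1 : '$' ∈ t
    · obtain ⟨m, b, he2, hb⟩ := exists_last_dollar h1
      -- cs = a ++ '$' :: m ++ '$' :: b, '$' ∉ a, '$' ∉ b
      have hcseq : cs = a ++ '$' :: (m ++ '$' :: b) := by rw [he, he2]
      have hloop : mfLoopA 0 (0, 0, 0) cs =
          ((m.count '$' : Int) + 2, (a.length : Int), ((a.length + 1 + m.length : Nat) : Int)) := by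
        rw [hcseq, mfLoopA_no_dollar _ 0 _ ha, Nat.zero_add, mfLoopA_dollar,
          if_pos (by norm_num : (0 : Int) + 1 = 1), show ((0 : Int) + 1) = 1 from by norm_num,
          mfLoopA_after m (a.length + 1) 1 _ _ (by omega) hb]
        refine Prod.ext ?_ (Prod.ext ?_ ?_) <;> (simp; try push_cast; try omega)
      have hsplit : PySem.Chars.splitOn cs ['$'] = a :: (splitSpec [] m ++ [b]) := by
        rw [hcseq, splitOn_eq_splitSpec, splitSpec_append, splitSpec_no_dollar _ ha,
          splitSpec_append, splitSpec_no_dollar _ hb]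
        simp
      have hlen : (PySem.Chars.splitOn cs ['$']).length = m.count '$' + 3 := by
        rw [hsplit]; simp [splitSpec_length]
      -- the three slices A takes when num_dollar > 2
      have hfa : (a.length : Int) + 1 = ((a.length + 1 : Nat) : Int) := by push_cast; ring
      have hs1 : PySem.Chars.slice cs none (some ((a.length : Int) + 1)) = a ++ ['$'] := by
        simp only [PySem.Chars.slice_eq_listSlice, hfa, PySem.List.slice_to_natCast, hcseq]
        rw [show a ++ '$' :: (m ++ '$' :: b) = (a ++ ['$']) ++ (m ++ '$' :: b) by simp]
        exact List.take_left' (by simp)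
      have hdrop : List.drop (a.length + 1) cs = m ++ '$' :: b := by
        rw [hcseq, show a ++ '$' :: (m ++ '$' :: b) = (a ++ ['$']) ++ (m ++ '$' :: b) by simp]
        exact List.drop_left' (by simp)
      have hs2 : PySem.Chars.slice cs (some ((a.length : Int) + 1))
          (some ((a.length + 1 + m.length : Nat) : Int)) = m := by
        simp only [PySem.Chars.slice_eq_listSlice, hfa, PySem.List.slice_natCast]
        rw [hdrop, show a.length + 1 + m.length - (a.length + 1) = m.length from by omega,
          show m ++ '$' :: b = m ++ ('$' :: b) from rfl]
        exact List.take_left' rfl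
      have hs3 : PySem.Chars.slice cs (some ((a.length + 1 + m.length : Nat) : Int)) none =
          '$' :: b := by
        simp only [PySem.Chars.slice_eq_listSlice, PySem.List.slice_from_natCast, hcseq]
        rw [show a ++ '$' :: (m ++ '$' :: b) = ((a ++ ['$']) ++ m) ++ ('$' :: b) by simp]
        exact List.drop_left' (by simp; omega)
      -- B's middle pieces
      have hmid : PySem.List.slice (a :: (splitSpec [] m ++ [b])) (some 1) (some (-1)) =
          splitSpec [] m := slice_one_neg_one a b (splitSpec [] m)
      have hlast : (a :: (splitSpec [] m ++ [b])).getLastD [] = b := by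
        rw [show a :: (splitSpec [] m ++ [b]) = (a :: splitSpec [] m) ++ [b] from rfl]
        exact List.getLastD_concat
      by_cases hm : '$' ∈ m
      · -- num_dollar > 2 : strip interior
        have hcnt : 1 ≤ m.count '$' := List.one_le_count_iff.mpr hm
        have hlenL : (a :: (splitSpec [] m ++ [b])).length = m.count '$' + 3 := by
          simp [splitSpec_length]
        simp only [math_fix, math_fix_alt, ← hcs, hloop, hsplit, hlenL]
        split_ifs <;>
          first
          | (exfalso; omega)
          | (congr 1
             rw [hs1, hs2, hs3, hmid, hlast, join_splitSpec, mathClean_eq_filter]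
             simp)
      · -- num_dollar = 2 : unchanged
        have hcnt : m.count '$' = 0 := List.count_eq_zero.mpr hm
        have hloop2 : mfLoopA 0 (0, 0, 0) cs =
            ((2 : Int), (a.length : Int), ((a.length + 1 + m.length : Nat) : Int)) := by
          rw [hloop, hcnt]; norm_num
        have hlenL : (a :: (splitSpec [] m ++ [b])).length = 3 := by
          simp [splitSpec_length, hcnt]
        have hmod : PySem.Int.mod 2 2 = 0 := by decide
        simp only [math_fix, math_fix_alt, ← hcs, hloop2, hsplit, hlenL, hmod]
        split_ifs <;>
          first
          | (exfalso; omega)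
          | (rw [hmid, hlast, join_splitSpec [] m, filter_of_no_dollar hm]
             simp only [List.headD_cons, List.nil_append]
             have hse : s.toList = a ++ '$' :: m ++ '$' :: b := by
               rw [← hcs, hcseq]; simp
             rw [← hse, String.ofList_toList])
    · -- exactly one '$'
      have hcnt : t.count '$' = 0 := List.count_eq_zero.mpr h1
      have hloop : mfLoopA 0 (0, 0, 0) cs = (1, (a.length : Int), (a.length : Int)) := by
        rw [he, mfLoopA_no_dollar _ 0 _ ha, Nat.zero_add, mfLoopA_dollar,
          if_pos (by norm_num : (0 : Int) + 1 = 1), mfLoopA_nodollar' _ _ h1]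
        norm_num
      have hsplit : PySem.Chars.splitOn cs ['$'] = [a, t] := by
        rw [he, splitOn_eq_splitSpec, splitSpec_append, splitSpec_no_dollar _ ha,
          splitSpec_no_dollar _ h1]
        simp
      have hmod : PySem.Int.mod 1 2 = 1 := by decide
      simp only [math_fix, math_fix_alt, ← hcs, hloop, hsplit, hmod,
        List.length_cons, List.length_nil]
      split_ifs <;>
        first
        | (exfalso; omega)
        | (congr 1
           rw [mathClean_eq_filter, he, joinNil]
           simp [List.filter_append, filter_of_no_dollar ha, filter_of_no_dollar h1])
  · -- no '$'
    have hloop : mfLoopA 0 (0, 0, 0) cs = (0, 0, 0) := mfLoopA_nodollar' 0 _ h0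
    have hsplit : PySem.Chars.splitOn cs ['$'] = [cs] := by
      rw [splitOn_eq_splitSpec, splitSpec_no_dollar [] h0]; simp
    have hmod : PySem.Int.mod 0 2 = 0 := by decide
    simp only [math_fix, math_fix_alt, ← hcs, hloop, hsplit, hmod,
      List.length_cons, List.length_nil]
    split_ifs <;>
      first
      | (exfalso; omega)
      | rfl

-- ===== VERDICT (by name: the statement is the Claim_ definition above) =====
theorem math_fix_spec : Claim_equal_math_fix := by
  intro s _
  unfold Spec_math_fix
  exact math_fix_eq_alt s
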